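-- pv_equiv track=rewrite | github.com/MicaelPresotto/INE5421 | LL1_Micael.py | getBodyFirst
-- ===== SOURCE A (Python) =====
-- def is_terminal(symbol):
--     return symbol.islower()
--
-- def getBodyFirst(production:str, firsts:dict):
--     body_firsts = set()
--     for i,symbol in enumerate(production):
--         if is_terminal(symbol) and i==0 or symbol=="&":
--             return {symbol}
--         if not is_terminal(symbol) and i==0 and "&" not in firsts[symbol]:
--             return firsts[symbol]
--         body_firsts.update(firsts[symbol])
--         body_firsts.discard("&")
--         for char in production[1:]:
--             if is_terminal(char):
--                 body_firsts.add(char)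
--                 return body_firsts
--             if "&" in firsts[char]:
--                 body_firsts.update(firsts[char])
--                 body_firsts.discard("&")
--                 continue
--             body_firsts.update(firsts[char])
--             return body_firsts
--     count_epsilon = 0
--     for char in production:
--         if is_terminal(char) or char=="&":
--             break
--         else:
--             if "&" in firsts[char]:
--                 count_epsilon+=1
--                 continue
--             else:
--                 break
--     if count_epsilon==len(production):
--         body_firsts.add("&")
--
--     return body_firsts
-- ===== SOURCE B (Python) =====
-- def is_terminal(symbol):
--     return symbol.islower()
--
-- def getBodyFirst(production: str, firsts: dict):
--     # Single left-to-right pass: FIRST of a concatenation with epsilon propagation.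
--     result = set()
--     for symbol in production:
--         if is_terminal(symbol) or symbol == "&":
--             result.add(symbol)
--             return result
--         f = set(firsts[symbol])
--         result |= f - {"&"}
--         if "&" not in f:
--             return result
--     result.add("&")
--     return result
-- ===== Notes on version B (the rewrite author's own statement) =====
-- stated objective: simpler
-- what changed: A's outer enumerate loop re-runs an inner scan over production[1:] on every iteration plus a final count_epsilon pass; B is one plain left-to-right pass computing FIRST of the concatenation with epsilon propagation.
-- outside the precondition, e.g. on getBodyFirst('A&', {'A': ['x', '&'], '&': ['y']}): A returns {'x', 'y'}, B returns {'&', 'x'}; on getBodyFirst('AB', {'A': ['a']}): A returns {'a'}, B returns {'a'}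
import Mathlib
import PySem

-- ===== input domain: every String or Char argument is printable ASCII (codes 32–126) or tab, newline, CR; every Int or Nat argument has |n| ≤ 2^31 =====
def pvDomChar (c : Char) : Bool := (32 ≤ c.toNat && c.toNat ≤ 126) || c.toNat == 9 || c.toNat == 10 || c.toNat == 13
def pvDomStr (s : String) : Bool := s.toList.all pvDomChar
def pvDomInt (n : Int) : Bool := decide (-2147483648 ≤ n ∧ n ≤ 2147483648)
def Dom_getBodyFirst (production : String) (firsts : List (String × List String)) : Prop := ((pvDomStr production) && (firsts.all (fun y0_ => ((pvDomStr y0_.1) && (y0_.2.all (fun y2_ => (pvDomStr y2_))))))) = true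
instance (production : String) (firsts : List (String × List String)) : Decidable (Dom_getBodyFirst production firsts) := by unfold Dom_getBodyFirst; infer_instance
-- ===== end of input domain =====

-- B replaces A's nested rescan (outer loop re-running an inner loop over production[1:], plus a
-- final count_epsilon pass) by one left-to-right pass computing FIRST of a concatenation with
-- epsilon propagation (objective: simpler).

-- ===== PORT A =====
-- is_terminal(symbol) on the one-char strings produced by iterating production
def pvIsTerminal (c : Char) : Bool := PySem.Chars.islower c

def pvSym (c : Char) : String := String.ofList [c]

-- firsts[symbol]: dict lookup, first match; total form used only under Pre_ (key present)
def pvFirstsGet (firsts : List (String × List String)) (c : Char) : List String :=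
  (List.lookup (pvSym c) firsts).getD []

-- the inner 'for char in production[1:]' loop; inl = early return, inr = fell through (with the mutated body_firsts)
def pvAInner (firsts : List (String × List String)) :
    List Char → PySem.Set String → (PySem.Set String ⊕ PySem.Set String)
  | [], acc => Sum.inr acc
  | c :: rest, acc =>
    if pvIsTerminal c then Sum.inl (PySem.Set.add acc (pvSym c))
    else if (pvFirstsGet firsts c).contains "&" then
      pvAInner firsts rest
        (PySem.Set.discard (PySem.Set.update acc (pvFirstsGet firsts c)) "&")
    else Sum.inl (PySem.Set.update acc (pvFirstsGet firsts c))

-- the outer 'for i,symbol in enumerate(production)' loop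
def pvAOuter (firsts : List (String × List String)) (tail : List Char) :
    List (Int × Char) → PySem.Set String → (PySem.Set String ⊕ PySem.Set String)
  | [], acc => Sum.inr acc
  | (i, s) :: rest, acc =>
    if (pvIsTerminal s && i == 0) || s == '&' then Sum.inl (PySem.Set.ofList [pvSym s])
    else if (!pvIsTerminal s) && i == 0 && !((pvFirstsGet firsts s).contains "&") then
      Sum.inl (PySem.Set.ofList (pvFirstsGet firsts s))
    else
      match pvAInner firsts tail
          (PySem.Set.discard (PySem.Set.update acc (pvFirstsGet firsts s)) "&") with
      | Sum.inl v => Sum.inl v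
      | Sum.inr acc' => pvAOuter firsts tail rest acc'

-- the count_epsilon loop
def pvACount (firsts : List (String × List String)) : List Char → Nat
  | [] => 0
  | c :: rest =>
    if pvIsTerminal c || c == '&' then 0
    else if (pvFirstsGet firsts c).contains "&" then 1 + pvACount firsts rest
    else 0

def getBodyFirst (production : String) (firsts : List (String × List String)) : List String :=
  match pvAOuter firsts (PySem.List.slice production.toList (some 1) none)
      (PySem.List.enumerate production.toList) PySem.Set.empty with
  | Sum.inl v => v
  | Sum.inr acc =>
    if pvACount firsts production.toList = production.toList.length then PySem.Set.add acc "&"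
    else acc

-- ===== PORT B =====
def pvBLoop (firsts : List (String × List String)) :
    List Char → PySem.Set String → PySem.Set String
  | [], acc => PySem.Set.add acc "&"
  | c :: rest, acc =>
    if pvIsTerminal c || c == '&' then PySem.Set.add acc (pvSym c)
    else
      let f := PySem.Set.ofList (pvFirstsGet firsts c)
      let acc' := PySem.Set.update acc (PySem.Set.diff f (PySem.Set.ofList ["&"]))
      if f.contains "&" then pvBLoop firsts rest acc' else acc'

def getBodyFirst_alt (production : String) (firsts : List (String × List String)) : List String :=
  pvBLoop firsts production.toList PySem.Set.empty

-- ===== PRECONDITION & SPEC =====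
-- Pre_ excludes productions whose tail (everything after the first symbol) contains '&', and
-- productions (with a non-terminal, non-'&' head) containing a non-lowercase symbol that is not a
-- key of firsts: on most of those A raises KeyError, and where A still returns (an early return
-- taken before the missing key, or '&' present as a firsts key so A accidentally looks up
-- firsts['&'] for a mid-production '&') the value is an artefact of A's lookup, not a FIRST set.
def Pre_getBodyFirst (production : String) (firsts : List (String × List String)) : Prop :=
  (match production.toList with
   | [] => true
   | c :: rest =>
     pvIsTerminal c || c == '&' ||
       ((c :: rest).all (fun d => pvIsTerminal d || (List.lookup (pvSym d) firsts).isSome) &&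
        !(rest.contains '&'))) = true

instance (production : String) (firsts : List (String × List String)) : Decidable (Pre_getBodyFirst production firsts) := by unfold Pre_getBodyFirst; infer_instance

def pvWitness_getBodyFirst : String × (List (String × List String)) :=
  ("AB", [("A", ["a", "&"]), ("B", ["b"])])

def Spec_getBodyFirst (production : String) (firsts : List (String × List String)) (out : List String) : Prop := out = getBodyFirst_alt production firsts
instance (production : String) (firsts : List (String × List String)) (out : List String) : Decidable (Spec_getBodyFirst production firsts out) := by unfold Spec_getBodyFirst; infer_instance

-- ===== CLAIM (what is proved, stated in full; the proofs are below) =====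
def Claim_equal_getBodyFirst : Prop := ∀ (production : String) (firsts : List (String × List String)), Dom_getBodyFirst production firsts → Pre_getBodyFirst production firsts → Spec_getBodyFirst production firsts (getBodyFirst production firsts)

-- ===== LEMMAS AND PROOFS =====

theorem pv_witness_ok :
    Dom_getBodyFirst pvWitness_getBodyFirst.1 pvWitness_getBodyFirst.2 ∧
    Pre_getBodyFirst pvWitness_getBodyFirst.1 pvWitness_getBodyFirst.2 := by decide

-- discard commutes with add

theorem pv_discard_of_not_mem (s : PySem.Set String) (e : String) (h : e ∉ s) :
    PySem.Set.discard s e = s := by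
  apply List.filter_eq_self.2
  intro a ha
  have : a ≠ e := fun hh => h (hh ▸ ha)
  simp [this]

theorem pv_discard_add (s : PySem.Set String) (x e : String) :
    PySem.Set.discard (PySem.Set.add s x) e =
      if x = e then PySem.Set.discard s e else PySem.Set.add (PySem.Set.discard s e) x := by
  by_cases hx : x ∈ s
  · rw [PySem.Set.add_of_mem hx]
    split_ifs with he
    · rfl
    · rw [PySem.Set.add_of_mem]
      rw [PySem.Set.mem_discard]
      exact ⟨hx, he⟩
  · rw [PySem.Set.add_of_not_mem hx]
    simp only [PySem.Set.discard, List.filter_append]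
    split_ifs with he
    · subst he; simp
    · have hnm : x ∉ List.filter (fun y => !(y == e)) s := fun hc => hx (List.mem_of_mem_filter hc)
      rw [PySem.Set.add_of_not_mem hnm]
      simp [he]

theorem pv_discard_update (s : PySem.Set String) (f : List String) (e : String) :
    PySem.Set.discard (PySem.Set.update s f) e =
      PySem.Set.update (PySem.Set.discard s e) (f.filter (fun y => !(y == e))) := by
  induction f generalizing s with
  | nil => rfl
  | cons x xs ih =>
    simp only [PySem.Set.update, List.foldl_cons, List.filter_cons] at *
    by_cases he : x = e
    · subst he
      simp only [beq_self_eq_true, Bool.not_true, Bool.false_eq_true, if_false]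
      rw [ih]
      congr 1
      rw [pv_discard_add]
      simp
    · have hbe : (x == e) = false := by simp [he]
      simp only [hbe, Bool.not_false, if_true, List.foldl_cons]
      rw [ih, pv_discard_add]
      simp [he]


theorem pv_ofList_filter (p : String → Bool) (xs : List String) :
    PySem.Set.ofList (xs.filter p) = (PySem.Set.ofList xs).filter p := by
  induction xs with
  | nil => rfl
  | cons x xs ih =>
    rw [List.filter_cons, PySem.Set.ofList_cons]
    by_cases hp : p x
    · simp only [hp, if_true]
      rw [PySem.Set.ofList_cons, ih]
      simp only [List.filter_cons, hp, if_true]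
      congr 1
      simp only [PySem.Set.discard]
      rw [List.filter_comm]
    · simp only [hp, Bool.false_eq_true, if_false]
      rw [ih]
      simp only [List.filter_cons, hp, Bool.false_eq_true, if_false]
      simp only [PySem.Set.discard]
      rw [List.filter_comm]
      rw [show List.filter (fun y => !(y == x)) (List.filter p (PySem.Set.ofList xs)) =
            List.filter p (PySem.Set.ofList xs) from List.filter_eq_self.2 (by
        intro a ha
        have hax : a ≠ x := by
          rintro rfl
          have := List.of_mem_filter ha
          simp [hp] at this
        simp [hax])]

theorem pv_update_ofList (s : PySem.Set String) (xs : List String) :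
    PySem.Set.update s (PySem.Set.ofList xs) = PySem.Set.update s xs := by
  rw [PySem.Set.update_eq_append_filter, PySem.Set.update_eq_append_filter,
    PySem.Set.ofList_ofList]

theorem pv_bstep (s : PySem.Set String) (f : List String) :
    PySem.Set.update s (PySem.Set.diff (PySem.Set.ofList f) (PySem.Set.ofList ["&"])) =
      PySem.Set.update s (f.filter (fun y => !(y == "&"))) := by
  have h1 : PySem.Set.diff (PySem.Set.ofList f) (PySem.Set.ofList ["&"]) =
      (PySem.Set.ofList f).filter (fun y => !(y == "&")) := by
    simp only [PySem.Set.diff]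
    congr 1
    funext y
    by_cases hy : y = "&" <;> simp [PySem.Set.contains, hy]
  rw [h1, ← pv_ofList_filter, pv_update_ofList]

theorem pv_update_of_subset (s : PySem.Set String) (l : List String) (h : ∀ x ∈ l, x ∈ s) :
    PySem.Set.update s l = s := by
  rw [PySem.Set.update_eq_append_filter]
  have hnil : List.filter (fun y => !(PySem.Set.contains s y)) (PySem.Set.ofList l) = [] := by
    rw [List.filter_eq_nil_iff]
    intro a ha
    have : a ∈ s := h a ((PySem.Set.mem_ofList l a).1 ha)
    simp [PySem.Set.contains, this]
  rw [hnil, List.append_nil]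


-- discard after a whole update = update by the filtered list


-- ofList commutes with filter


-- B's step '|= f - {"&"}' equals update by the filtered value list

-- A's step 'update; discard "&"' equals the same, when "&" is not yet in the set
theorem pv_astep (s : PySem.Set String) (f : List String) (h : "&" ∉ s) :
    PySem.Set.discard (PySem.Set.update s f) "&" =
      PySem.Set.update s (f.filter (fun y => !(y == "&"))) := by
  rw [pv_discard_update, pv_discard_of_not_mem s "&" h]


-- invariant carried through the epsilon chain
def pvEps (firsts : List (String × List String)) (tail : List Char) : Prop :=
  ∀ c ∈ tail, pvIsTerminal c = false ∧ (pvFirstsGet firsts c).contains "&" = true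

def pvSat (firsts : List (String × List String)) (tail : List Char) (acc : PySem.Set String) : Prop :=
  (∀ c ∈ tail, ∀ x ∈ pvFirstsGet firsts c, x ≠ "&" → x ∈ acc) ∧ "&" ∉ acc

theorem pv_stepfix (firsts : List (String × List String)) (tail : List Char) (acc : PySem.Set String)
    (c : Char) (hc : c ∈ tail) (h : pvSat firsts tail acc) :
    PySem.Set.discard (PySem.Set.update acc (pvFirstsGet firsts c)) "&" = acc := by
  rw [pv_astep _ _ h.2]
  apply pv_update_of_subset
  intro x hx
  have hxf := List.mem_of_mem_filter hx
  have hxne : x ≠ "&" := by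
    have := List.of_mem_filter hx
    simpa using this
  exact h.1 c hc x hxf hxne

theorem pv_inner_fix (firsts : List (String × List String)) (full : List Char) :
    ∀ (tail : List Char) (acc : PySem.Set String), (∀ c ∈ tail, c ∈ full) →
      pvEps firsts tail → pvSat firsts full acc →
      pvAInner firsts tail acc = Sum.inr acc := by
  intro tail
  induction tail with
  | nil => intro acc _ _ _; rfl
  | cons c rest ih =>
    intro acc hsub heps hsat
    have hc := heps c (List.mem_cons_self)
    rw [pvAInner, if_neg (by simp [hc.1]), if_pos hc.2,
      pv_stepfix firsts full acc c (hsub c List.mem_cons_self) hsat]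
    exact ih acc (fun d hd => hsub d (List.mem_cons_of_mem _ hd))
      (fun d hd => heps d (List.mem_cons_of_mem _ hd)) hsat

theorem pv_outer_fix (firsts : List (String × List String)) (tail : List Char)
    (heps : pvEps firsts tail) (hamp : '&' ∉ tail) :
    ∀ (pairs : List (Int × Char)) (acc : PySem.Set String), (∀ p ∈ pairs, p.2 ∈ tail) →
      pvSat firsts tail acc →
      pvAOuter firsts tail pairs acc = Sum.inr acc := by
  intro pairs
  induction pairs with
  | nil => intro acc _ _; rfl
  | cons p rest ih =>
    intro acc hsub hsat
    obtain ⟨i, s⟩ := p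
    have hs : s ∈ tail := hsub (i, s) List.mem_cons_self
    have hterm : pvIsTerminal s = false := (heps s hs).1
    have hcont : (pvFirstsGet firsts s).contains "&" = true := (heps s hs).2
    have hsne : s ≠ '&' := fun hh => hamp (hh ▸ hs)
    have hm : "&" ∈ pvFirstsGet firsts s := by simpa using hcont
    rw [pvAOuter, if_neg (by simp [hterm, hsne]), if_neg (by simp [hm]),
      pv_stepfix firsts tail acc s hs hsat,
      pv_inner_fix firsts tail tail acc (fun d hd => hd) heps hsat]
    exact ih acc (fun q hq => hsub q (List.mem_cons_of_mem _ hq)) hsat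

theorem pv_count_full (firsts : List (String × List String)) :
    ∀ (tail : List Char), pvEps firsts tail → '&' ∉ tail →
      pvACount firsts tail = tail.length := by
  intro tail
  induction tail with
  | nil => intro _ _; rfl
  | cons c rest ih =>
    intro heps hamp
    have hc := heps c List.mem_cons_self
    have hcne : c ≠ '&' := fun hh => hamp (hh ▸ List.mem_cons_self)
    rw [pvACount, if_neg (by simp [hc.1, hcne]), if_pos hc.2,
      ih (fun d hd => heps d (List.mem_cons_of_mem _ hd))
        (fun hd => hamp (List.mem_cons_of_mem _ hd))]
    simp [List.length_cons, Nat.add_comm]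

-- the main inner/B correspondence
theorem pv_main (firsts : List (String × List String)) :
    ∀ (tail : List Char) (acc : PySem.Set String), '&' ∉ tail → "&" ∉ acc →
      (∀ v, pvAInner firsts tail acc = Sum.inl v → pvBLoop firsts tail acc = v) ∧
      (∀ acc', pvAInner firsts tail acc = Sum.inr acc' →
        pvBLoop firsts tail acc = PySem.Set.add acc' "&" ∧
        pvEps firsts tail ∧ (∀ x ∈ acc, x ∈ acc') ∧ pvSat firsts tail acc') := by
  intro tail
  induction tail with
  | nil =>
    intro acc _ hacc
    refine ⟨fun v hv => by simp [pvAInner] at hv, fun acc' hacc' => ?_⟩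
    have : acc = acc' := by simpa [pvAInner] using hacc'
    subst this
    exact ⟨rfl, fun c hc => by simp at hc, fun x hx => hx, fun c hc => by simp at hc, hacc⟩
  | cons c rest ih =>
    intro acc hamp hacc
    have hcne : c ≠ '&' := fun hh => hamp (hh ▸ List.mem_cons_self)
    have hampr : '&' ∉ rest := fun hd => hamp (List.mem_cons_of_mem _ hd)
    by_cases hterm : pvIsTerminal c = true
    · refine ⟨fun v hv => ?_, fun acc' hacc' => ?_⟩
      · rw [pvAInner, if_pos hterm] at hv
        rw [pvBLoop, if_pos (by simp [hterm])]
        exact Sum.inl.inj hv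
      · rw [pvAInner, if_pos hterm] at hacc'
        exact absurd hacc' (by simp)
    · have hterm' : pvIsTerminal c = false := by simpa using hterm
      by_cases hcont : (pvFirstsGet firsts c).contains "&" = true
      · -- epsilon symbol: both sides step to the same accumulator
        have hstep : PySem.Set.discard (PySem.Set.update acc (pvFirstsGet firsts c)) "&" =
            PySem.Set.update acc ((pvFirstsGet firsts c).filter (fun y => !(y == "&"))) :=
          pv_astep acc _ hacc
        have hacc2 : "&" ∉ PySem.Set.update acc ((pvFirstsGet firsts c).filter (fun y => !(y == "&"))) := by
          rw [PySem.Set.mem_update]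
          rintro (h1 | h1)
          · exact hacc h1
          · have := List.of_mem_filter h1
            simp at this
        have hA : pvAInner firsts (c :: rest) acc =
            pvAInner firsts rest (PySem.Set.update acc ((pvFirstsGet firsts c).filter (fun y => !(y == "&")))) := by
          rw [pvAInner, if_neg (by simp [hterm']), if_pos hcont, hstep]
        have hB : pvBLoop firsts (c :: rest) acc =
            pvBLoop firsts rest (PySem.Set.update acc ((pvFirstsGet firsts c).filter (fun y => !(y == "&")))) := by
          rw [pvBLoop, if_neg (by simp [hterm', hcne])]
          simp only
          rw [if_pos (by simpa [PySem.Set.contains_eq_listContains] using hcont), pv_bstep]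
        have IH := ih (PySem.Set.update acc ((pvFirstsGet firsts c).filter (fun y => !(y == "&")))) hampr hacc2
        refine ⟨fun v hv => ?_, fun acc' hacc' => ?_⟩
        · rw [hB]; exact IH.1 v (by rw [← hA]; exact hv)
        · have H := IH.2 acc' (by rw [← hA]; exact hacc')
          refine ⟨by rw [hB]; exact H.1, ?_, ?_, ?_, H.2.2.2.2⟩
          · intro d hd
            rcases List.mem_cons.1 hd with rfl | hd'
            · exact ⟨hterm', hcont⟩
            · exact H.2.1 d hd'
          · intro x hx
            exact H.2.2.1 x (by rw [PySem.Set.mem_update]; exact Or.inl hx)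
          · intro d hd
            rcases List.mem_cons.1 hd with rfl | hd'
            · intro x hxf hxne
              refine H.2.2.1 x ?_
              rw [PySem.Set.mem_update]
              exact Or.inr (List.mem_filter.2 ⟨hxf, by simp [hxne]⟩)
            · exact H.2.2.2.1 d hd'
      · have hcont' : (pvFirstsGet firsts c).contains "&" = false := by simpa using hcont
        have hnampf : "&" ∉ pvFirstsGet firsts c := by simpa using hcont'
        refine ⟨fun v hv => ?_, fun acc' hacc' => ?_⟩
        · rw [pvAInner, if_neg (by simp [hterm']), if_neg (by simp [hnampf])] at hv
          rw [pvBLoop, if_neg (by simp [hterm', hcne])]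
          simp only
          rw [if_neg (by simp [hnampf]), pv_bstep]
          rw [show (pvFirstsGet firsts c).filter (fun y => !(y == "&")) = pvFirstsGet firsts c from
            List.filter_eq_self.2 (fun a ha => by
              have : a ≠ "&" := fun hh => hnampf (hh ▸ ha)
              simp [this])]
          exact Sum.inl.inj hv
        · rw [pvAInner, if_neg (by simp [hterm']), if_neg (by simp [hnampf])] at hacc'
          exact absurd hacc' (by simp)

-- ===== VERDICT (by name: the statement is the Claim_ definition above) =====
theorem getBodyFirst_spec : Claim_equal_getBodyFirst := by
  intro production firsts _ hpre
  unfold Spec_getBodyFirst getBodyFirst getBodyFirst_alt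
  unfold Pre_getBodyFirst at hpre
  rcases hcs : production.toList with _ | ⟨c, rest⟩
  · rfl
  · rw [hcs] at hpre
    rw [PySem.List.slice_from _ (by norm_num : (0:Int) ≤ 1)]
    simp only [Int.toNat_one, List.drop_succ_cons, List.drop_zero]
    rw [show PySem.List.enumerate (c :: rest) = (0, c) :: PySem.List.enumerate rest 1 from
      PySem.List.enumerate_cons c rest 0]
    by_cases hterm : pvIsTerminal c = true
    · rw [pvAOuter, if_pos (by simp [hterm]), pvBLoop, if_pos (by simp [hterm])]
      rfl
    · have hterm' : pvIsTerminal c = false := by simpa using hterm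
      by_cases hamp0 : c = '&'
      · subst hamp0
        rw [pvAOuter, if_pos (by simp), pvBLoop, if_pos (by simp)]
        rfl
      · simp only [hterm', hamp0, Bool.false_or, Bool.or_eq_true, beq_iff_eq,
          Bool.and_eq_true, Bool.not_eq_true', false_or] at hpre
        have hampr : '&' ∉ rest := by
          have := hpre.2
          simp only [List.contains_eq_mem, decide_eq_false_iff_not] at this
          exact this
        by_cases hcont : (pvFirstsGet firsts c).contains "&" = true
        · -- head nonterminal whose FIRST contains epsilon
          have hm : "&" ∈ pvFirstsGet firsts c := by simpa using hcont
          have hstep : PySem.Set.discard (PySem.Set.update PySem.Set.empty (pvFirstsGet firsts c)) "&" =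
              PySem.Set.update PySem.Set.empty ((pvFirstsGet firsts c).filter (fun y => !(y == "&"))) :=
            pv_astep _ _ (by simp [PySem.Set.empty])
          set acc1 := PySem.Set.update PySem.Set.empty ((pvFirstsGet firsts c).filter (fun y => !(y == "&"))) with hacc1def
          have hacc1 : "&" ∉ acc1 := by
            rw [hacc1def, PySem.Set.mem_update]
            rintro (h1 | h1)
            · simp [PySem.Set.empty] at h1
            · have := List.of_mem_filter h1
              simp at this
          have hB0 : pvBLoop firsts (c :: rest) PySem.Set.empty = pvBLoop firsts rest acc1 := by
            rw [pvBLoop, if_neg (by simp [hterm', hamp0])]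
            simp only
            rw [if_pos (by simpa using hm), pv_bstep]
          have main := pv_main firsts rest acc1 hampr hacc1
          rcases hinner : pvAInner firsts rest acc1 with v | acc'
          · have hAval : pvAOuter firsts rest ((0, c) :: PySem.List.enumerate rest 1) PySem.Set.empty =
                Sum.inl v := by
              rw [pvAOuter, if_neg (by simp [hterm', hamp0]), if_neg (by simp [hm]), hstep, hinner]
            rw [hAval, hB0, main.1 v hinner]
          · obtain ⟨hB, heps, _, hsat'⟩ := main.2 acc' hinner
            have hpairs : ∀ p ∈ PySem.List.enumerate rest 1, p.2 ∈ rest := by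
              intro p hp
              obtain ⟨k, hk, rfl⟩ := (PySem.List.mem_enumerate_iff rest 1 p).1 hp
              exact List.getElem_mem hk
            have hAval : pvAOuter firsts rest ((0, c) :: PySem.List.enumerate rest 1) PySem.Set.empty =
                Sum.inr acc' := by
              rw [pvAOuter, if_neg (by simp [hterm', hamp0]), if_neg (by simp [hm]), hstep, hinner]
              exact pv_outer_fix firsts rest heps hampr (PySem.List.enumerate rest 1) acc' hpairs hsat'
            have hcount : pvACount firsts (c :: rest) = (c :: rest).length := by
              rw [pvACount, if_neg (by simp [hterm', hamp0]), if_pos hcont,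
                pv_count_full firsts rest heps hampr]
              simp [Nat.add_comm]
            rw [hAval, hB0, hB]
            simp [hcount]
        · -- head nonterminal without epsilon: A returns firsts[c] directly
          have hnampf : "&" ∉ pvFirstsGet firsts c := by simpa using hcont
          rw [pvAOuter, if_neg (by simp [hterm', hamp0]), if_pos (by simp [hterm', hnampf]),
            pvBLoop, if_neg (by simp [hterm', hamp0])]
          simp only
          rw [if_neg (by simp [hnampf]), pv_bstep,
            show (pvFirstsGet firsts c).filter (fun y => !(y == "&")) = pvFirstsGet firsts c from
              List.filter_eq_self.2 (fun a ha => by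
                have : a ≠ "&" := fun hh => hnampf (hh ▸ ha)
                simp [this]),
            show (PySem.Set.empty : PySem.Set String) = ([] : List String) from rfl,
            PySem.Set.update_nil_left]
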